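-- pv_equiv track=rewrite | github.com/LuiccianDev/daily-challenge-codedex-march-2026 | days/day-16/oscars-2026.py | oscar_pool
-- ===== SOURCE A (Python) =====
-- def oscar_pool(predictions):
--     # Lista oficial de ganadores (orden fijo)
--     winners = [
--         "One Battle After Another",
--         "Michael B. Jordan",
--         "Jessie Buckley",
--         "Paul Thomas Anderson"
--     ]
--
--     # Validación básica
--     if not isinstance(predictions, list) or len(predictions) == 0:
--         raise ValueError("predictions debe ser una lista no vacía")
--
--     best_name = None
--     best_score = -1
--     tie = False
--
--     for friend in predictions:
--         # Validar formato de cada predicción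
--         if not isinstance(friend, list) or len(friend) != 5:
--             raise ValueError(
--                 "Cada predicción debe tener 5 elementos: nombre + 4 predicciones"
--             )
--
--         name = friend[0]
--         guesses = friend[1:]
--
--         correct = 0
--
--         # Contar aciertos
--         for i in range(len(winners)):
--             if guesses[i] == winners[i]:
--                 correct += 1
--
--         # Calcular accuracy (no necesario para comparar, pero claro)
--         accuracy = correct / len(winners)
--
--         # Comparar con el mejor actual
--         if correct > best_score:
--             best_score = correct
--             best_name = name
--             tie = False
--         elif correct == best_score:
--             tie = True
--
--     return "Tie" if tie else best_name
-- ===== SOURCE B (Python) =====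
-- def oscar_pool(predictions):
--     winners = [
--         "One Battle After Another",
--         "Michael B. Jordan",
--         "Jessie Buckley",
--         "Paul Thomas Anderson",
--     ]
--
--     if not isinstance(predictions, list) or len(predictions) == 0:
--         raise ValueError("predictions debe ser una lista no vacía")
--
--     # First pass: build a score table of (name, correct) pairs.
--     table = []
--     for friend in predictions:
--         if not isinstance(friend, list) or len(friend) != 5:
--             raise ValueError(
--                 "Cada predicción debe tener 5 elementos: nombre + 4 predicciones"
--             )
--         correct = sum(1 for w, g in zip(winners, friend[1:]) if g == w)
--         table.append((friend[0], correct))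
--
--     # Second pass: max score, tie iff it is reached at least twice,
--     # otherwise the first name achieving it.
--     max_score = max(c for _, c in table)
--     if sum(1 for _, c in table if c == max_score) >= 2:
--         return "Tie"
--     return next(n for n, c in table if c == max_score)
-- ===== Notes on version B (the rewrite author's own statement) =====
-- stated objective: simpler
-- what changed: Replaces the fused single-pass running-best/tie-flag tracker with a two-phase decomposition: build a (name, score) table, then take the max score, declare 'Tie' iff it occurs at least twice, else return the first name achieving it; the unused accuracy computation is dropped.
import Mathlib
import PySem

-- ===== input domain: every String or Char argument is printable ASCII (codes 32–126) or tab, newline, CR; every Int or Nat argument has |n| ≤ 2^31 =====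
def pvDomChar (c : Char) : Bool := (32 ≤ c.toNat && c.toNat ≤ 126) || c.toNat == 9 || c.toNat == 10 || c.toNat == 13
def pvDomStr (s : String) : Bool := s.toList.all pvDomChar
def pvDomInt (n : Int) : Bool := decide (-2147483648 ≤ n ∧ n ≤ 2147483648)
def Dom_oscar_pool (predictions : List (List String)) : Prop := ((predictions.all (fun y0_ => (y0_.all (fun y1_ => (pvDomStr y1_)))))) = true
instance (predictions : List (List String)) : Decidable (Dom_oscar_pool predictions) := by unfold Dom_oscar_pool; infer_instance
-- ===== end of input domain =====

-- B replaces A's fused single-pass running-best/tie tracker by a simpler two-phase decomposition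
-- (build a (name, score) table, then max / count / first scan); return-value equivalence proved on Pre_.

-- ===== PORT A =====
def pvWinners : List String :=
  ["One Battle After Another", "Michael B. Jordan", "Jessie Buckley", "Paul Thomas Anderson"]

-- A's inner loop: for i in range(len(winners)): if guesses[i] == winners[i]: correct += 1
def pvCorrectA (guesses : List String) : Int :=
  (PySem.List.pyRange 0 4 1).foldl
    (fun c i => if PySem.List.pyGet? guesses i = PySem.List.pyGet? pvWinners i then c + 1 else c) 0

def oscar_pool (predictions : List (List String)) : String :=
  let st := predictions.foldl
    (fun (st : Option String × Int × Bool) friend =>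
      let name := (PySem.List.pyGet? friend 0).getD ""     -- friend[0]; in range whenever A returns (Pre_)
      let guesses := PySem.List.slice friend (some 1) none  -- friend[1:]
      let correct := pvCorrectA guesses
      if correct > st.2.1 then (some name, correct, false)
      else if correct = st.2.1 then (st.1, st.2.1, true)
      else st)
    (none, -1, false)
  if st.2.2 then "Tie" else st.1.getD ""

-- ===== PORT B =====
-- sum(1 for w, g in zip(winners, friend[1:]) if g == w)
def pvCorrectB (friend : List String) : Int :=
  (pvWinners.zip (friend.drop 1)).foldl (fun c p => if p.2 = p.1 then c + 1 else c) 0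

def oscar_pool_alt (predictions : List (List String)) : String :=
  let table := predictions.map
    (fun friend => ((PySem.List.pyGet? friend 0).getD "", pvCorrectB friend))
  match PySem.List.max? (table.map (fun p => p.2)) (fun y => y) with
  | none => ""   -- unreachable under Pre_ (Python max raises on an empty table)
  | some m =>
    if 2 ≤ table.countP (fun p => decide (p.2 = m)) then "Tie"
    else
      match table.find? (fun p => decide (p.2 = m)) with
      | some p => p.1
      | none => ""   -- unreachable: m is attained in table

-- ===== PRECONDITION & SPEC =====
-- A raises ValueError on an empty predictions list and on any friend entry whose length ≠ 5.
def Pre_oscar_pool (predictions : List (List String)) : Prop :=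
  predictions ≠ [] ∧ ∀ f ∈ predictions, f.length = 5
instance (predictions : List (List String)) : Decidable (Pre_oscar_pool predictions) := by
  unfold Pre_oscar_pool; infer_instance
def pvWitness_oscar_pool : List (List String) :=
  [["Ana", "One Battle After Another", "a", "Jessie Buckley", "b"],
   ["Luis", "x", "Michael B. Jordan", "y", "Paul Thomas Anderson"]]
def Spec_oscar_pool (predictions : List (List String)) (out : String) : Prop := out = oscar_pool_alt predictions
instance (predictions : List (List String)) (out : String) : Decidable (Spec_oscar_pool predictions out) := by unfold Spec_oscar_pool; infer_instance

-- ===== CLAIM (what is proved, stated in full; the proofs are below) =====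
def Claim_equal_oscar_pool : Prop := ∀ (predictions : List (List String)), Dom_oscar_pool predictions → Pre_oscar_pool predictions → Spec_oscar_pool predictions (oscar_pool predictions)

-- ===== LEMMAS AND PROOFS =====

-- the per-friend scores of the two ports agree on 5-element friends
lemma pvCorrect_eq (f : List String) (h : f.length = 5) :
    pvCorrectA (PySem.List.slice f (some 1) none) = pvCorrectB f := by
  match f, h with
  | [a, b, c, d, e], _ =>
    have hr : PySem.List.pyRange 0 4 1 = [0, 1, 2, 3] := by decide
    have h0 : ∀ x y z w : String, PySem.List.pyGet? [x, y, z, w] 0 = some x := fun _ _ _ _ => rfl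
    have h1 : ∀ x y z w : String, PySem.List.pyGet? [x, y, z, w] 1 = some y := fun _ _ _ _ => rfl
    have h2 : ∀ x y z w : String, PySem.List.pyGet? [x, y, z, w] 2 = some z := fun _ _ _ _ => rfl
    have h3 : ∀ x y z w : String, PySem.List.pyGet? [x, y, z, w] 3 = some w := fun _ _ _ _ => rfl
    have hs : PySem.List.slice [a, b, c, d, e] (some 1) none = [b, c, d, e] := by
      simp [PySem.List.slice]
    simp only [pvCorrectA, pvCorrectB, pvWinners, hs, hr, List.foldl, List.zip, List.zipWith,
      List.drop, h0, h1, h2, h3, Option.some.injEq]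

lemma pvCorrectB_nonneg (f : List String) : 0 ≤ pvCorrectB f := by
  have aux : ∀ (L : List (String × String)) (a : Int),
      a ≤ L.foldl (fun c p => if p.2 = p.1 then c + 1 else c) a := by
    intro L
    induction L with
    | nil => intro a; simp
    | cons p L ih =>
      intro a
      simp only [List.foldl_cons]
      split_ifs
      · exact le_trans (by omega) (ih (a + 1))
      · exact ih a
  exact aux _ 0

-- A's loop step, on the (name, score) pair it extracts from a friend
def pvStep (st : Option String × Int × Bool) (p : String × Int) : Option String × Int × Bool :=
  if p.2 > st.2.1 then (some p.1, p.2, false)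
  else if p.2 = st.2.1 then (st.1, st.2.1, true)
  else st

-- the run after the first friend has been absorbed (best name is no longer optional)
def pvRun (n : String) (m : Int) (tie : Bool) : List (String × Int) → String × Int × Bool
  | [] => (n, m, tie)
  | (n', c) :: l => if c > m then pvRun n' c false l
                    else if c = m then pvRun n m true l
                    else pvRun n m tie l

lemma pv_find_some (l : List (String × Int)) (M : Int) (h : M ∈ l.map (fun p => p.2)) :
    ∃ q, l.find? (fun p => decide (p.2 = M)) = some q := by
  obtain ⟨p, hp, hpm⟩ := List.mem_map.mp h
  have : (l.find? (fun p => decide (p.2 = M))).isSome := List.find?_isSome.mpr ⟨p, hp, by simp [hpm]⟩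
  exact Option.isSome_iff_exists.mp this

-- characterization of A's tracker: final best = max, name = first pair at the max,
-- tie flag = "the max occurs at least twice" (an earlier tie is erased by a later strict max)
lemma pvRun_char (l : List (String × Int)) : ∀ (n : String) (m : Int) (tie : Bool),
    pvRun n m tie l =
      (let M := (l.map (fun p => p.2)).foldl max m
       (((((n, m) :: l).find? (fun p => decide (p.2 = M))).getD (n, m)).1, M,
        decide (2 ≤ ((n, m) :: l).countP (fun p => decide (p.2 = M))) || (tie && decide (M = m)))) := by
  induction l with
  | nil => intro n m tie; simp [pvRun]
  | cons p l ih =>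
    obtain ⟨n', c⟩ := p
    intro n m tie
    simp only [List.map_cons, List.foldl_cons]
    rcases lt_trichotomy m c with h | h | h
    · -- c > m : run restarts at (n', c)
      have hmax : max m c = c := by omega
      have hrun : pvRun n m tie ((n', c) :: l) = pvRun n' c false l := by
        simp only [pvRun]; rw [if_pos h]
      rw [hrun, ih n' c false]; simp only [hmax]
      set M := (l.map (fun p => p.2)).foldl max c with hMdef
      have hcM : c ≤ M := (PySem.List.le_foldl_max _ _).1
      have hmM : ¬ (M = m) := by omega
      have hf : List.find? (fun p => decide (p.2 = M)) ((n, m) :: (n', c) :: l)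
              = List.find? (fun p => decide (p.2 = M)) ((n', c) :: l) :=
        List.find?_cons_of_neg (by simp; omega)
      rw [hf, Prod.mk.injEq, Prod.mk.injEq]
      refine ⟨?_, rfl, ?_⟩
      · by_cases hc : c = M
        · have h2 : List.find? (fun p => decide (p.2 = M)) ((n', c) :: l) = some (n', c) :=
            List.find?_cons_of_pos (by simpa using hc)
          simp [h2]
        · have h2 : List.find? (fun p => decide (p.2 = M)) ((n', c) :: l)
                  = List.find? (fun p => decide (p.2 = M)) l :=
            List.find?_cons_of_neg (by simpa using hc)
          have hMl : M ∈ l.map (fun p => p.2) := by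
            rcases PySem.List.foldl_max_mem (l.map (fun p => p.2)) c with h' | h'
            · exact absurd h'.symm hc
            · exact h'
          obtain ⟨q, hq⟩ := pv_find_some l M hMl
          simp [h2, hq]
      · simp only [List.countP_cons]
        have : ¬ ((n, m).2 = M) := by simp; omega
        simp [this, hmM]
    · -- c = m : tie set
      subst h
      have hmax : max m m = m := by omega
      have hrun : pvRun n m tie ((n', m) :: l) = pvRun n m true l := by
        simp [pvRun]
      rw [hrun, ih n m true]; simp only [hmax]
      set M := (l.map (fun p => p.2)).foldl max m with hMdef
      rw [Prod.mk.injEq, Prod.mk.injEq]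
      by_cases hm : m = M
      · have h1 : List.find? (fun p => decide (p.2 = M)) ((n, m) :: l) = some (n, m) :=
          List.find?_cons_of_pos (by simpa using hm)
        have h2 : List.find? (fun p => decide (p.2 = M)) ((n, m) :: (n', m) :: l) = some (n, m) :=
          List.find?_cons_of_pos (by simpa using hm)
        refine ⟨by simp [h1, h2], rfl, ?_⟩
        simp only [List.countP_cons]
        simp [← hm]
      · have hnm : ¬ (M = m) := fun h' => hm h'.symm
        have h1 : List.find? (fun p => decide (p.2 = M)) ((n, m) :: l)
                = List.find? (fun p => decide (p.2 = M)) l :=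
          List.find?_cons_of_neg (by simpa using hm)
        have h2 : List.find? (fun p => decide (p.2 = M)) ((n, m) :: (n', m) :: l)
                = List.find? (fun p => decide (p.2 = M)) ((n', m) :: l) :=
          List.find?_cons_of_neg (by simpa using hm)
        have h3 : List.find? (fun p => decide (p.2 = M)) ((n', m) :: l)
                = List.find? (fun p => decide (p.2 = M)) l :=
          List.find?_cons_of_neg (by simpa using hm)
        refine ⟨by rw [h1, h2, h3], rfl, ?_⟩
        simp only [List.countP_cons]
        simp [hm, hnm]
    · -- c < m : step is a no-op
      have hmax : max m c = m := by omega
      have hrun : pvRun n m tie ((n', c) :: l) = pvRun n m tie l := by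
        simp only [pvRun]; rw [if_neg (by omega), if_neg (by omega)]
      rw [hrun, ih n m tie]; simp only [hmax]
      set M := (l.map (fun p => p.2)).foldl max m with hMdef
      have hmM : m ≤ M := (PySem.List.le_foldl_max _ _).1
      have hcne : ¬ (c = M) := by omega
      rw [Prod.mk.injEq, Prod.mk.injEq]
      by_cases hm : m = M
      · have h1 : List.find? (fun p => decide (p.2 = M)) ((n, m) :: l) = some (n, m) :=
          List.find?_cons_of_pos (by simpa using hm)
        have h2 : List.find? (fun p => decide (p.2 = M)) ((n, m) :: (n', c) :: l) = some (n, m) :=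
          List.find?_cons_of_pos (by simpa using hm)
        refine ⟨by simp [h1, h2], rfl, by simp only [List.countP_cons]; simp [hcne]⟩
      · have h1 : List.find? (fun p => decide (p.2 = M)) ((n, m) :: l)
                = List.find? (fun p => decide (p.2 = M)) l :=
          List.find?_cons_of_neg (by simpa using hm)
        have h2 : List.find? (fun p => decide (p.2 = M)) ((n, m) :: (n', c) :: l)
                = List.find? (fun p => decide (p.2 = M)) ((n', c) :: l) :=
          List.find?_cons_of_neg (by simpa using hm)
        have h3 : List.find? (fun p => decide (p.2 = M)) ((n', c) :: l)
                = List.find? (fun p => decide (p.2 = M)) l :=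
          List.find?_cons_of_neg (by simpa using hcne)
        refine ⟨by rw [h1, h2, h3], rfl, by simp only [List.countP_cons]; simp [hcne]⟩

-- A's fold is pvStep over the (name, score) table
lemma pvFoldA_eq (l : List (List String)) : ∀ (st : Option String × Int × Bool),
    l.foldl
      (fun (st : Option String × Int × Bool) friend =>
        let name := (PySem.List.pyGet? friend 0).getD ""
        let guesses := PySem.List.slice friend (some 1) none
        let correct := pvCorrectA guesses
        if correct > st.2.1 then (some name, correct, false)
        else if correct = st.2.1 then (st.1, st.2.1, true)
        else st) st
    = (l.map (fun f => ((PySem.List.pyGet? f 0).getD "", pvCorrectA (PySem.List.slice f (some 1) none)))).foldl pvStep st := by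
  induction l with
  | nil => intro st; rfl
  | cons f l ih =>
    intro st
    simp only [List.foldl_cons, List.map_cons]
    exact ih _

-- foldl pvStep, once the name is set, is pvRun
lemma pvLift (l : List (String × Int)) : ∀ (n : String) (m : Int) (tie : Bool),
    l.foldl pvStep (some n, m, tie)
      = (some (pvRun n m tie l).1, (pvRun n m tie l).2.1, (pvRun n m tie l).2.2) := by
  induction l with
  | nil => intro n m tie; rfl
  | cons p l ih =>
    obtain ⟨n', c⟩ := p
    intro n m tie
    simp only [List.foldl_cons, pvStep, pvRun]
    rcases lt_trichotomy m c with h | h | h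
    · rw [if_pos h, if_pos h]; exact ih n' c false
    · subst h
      rw [if_neg (lt_irrefl m), if_pos rfl, if_neg (lt_irrefl m), if_pos rfl]; exact ih n m true
    · rw [if_neg (by omega), if_neg (by omega), if_neg (by omega), if_neg (by omega)]
      exact ih n m tie

-- assembled bridge: A's tracker over a nonempty table versus B's max/count/first scan
lemma pvMain (t : List (String × Int)) (n0 : String) (c0 : Int) (h : 0 ≤ c0) :
    (let st := List.foldl pvStep ((none : Option String), (-1 : Int), false) ((n0, c0) :: t)
     if st.2.2 then "Tie" else st.1.getD "")
    = (match PySem.List.max? (((n0, c0) :: t).map (fun p => p.2)) (fun y => y) with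
       | none => ""
       | some m =>
         if 2 ≤ ((n0, c0) :: t).countP (fun p => decide (p.2 = m)) then "Tie"
         else match ((n0, c0) :: t).find? (fun p => decide (p.2 = m)) with
              | some p => p.1
              | none => "") := by
  simp only [List.foldl_cons]
  rw [show pvStep ((none : Option String), (-1 : Int), false) (n0, c0) = (some n0, c0, false) from by
        simp only [pvStep]; rw [if_pos (by simp; omega)]]
  rw [pvLift, pvRun_char]
  simp only [List.map_cons]
  rw [PySem.List.max?_id_cons]
  set M := (t.map (fun p => p.2)).foldl max c0 with hM
  simp only [Bool.false_and, Bool.or_false]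
  by_cases hcnt : 2 ≤ ((n0, c0) :: t).countP (fun p => decide (p.2 = M))
  · simp [hcnt]
  · have hMl : M ∈ List.map (fun p => p.2) ((n0, c0) :: t) := by
      rcases PySem.List.foldl_max_mem (t.map (fun p => p.2)) c0 with h' | h'
      · have : M = c0 := h'
        rw [List.map_cons, this]
        exact List.mem_cons_self
      · rw [List.map_cons]
        exact List.mem_cons_of_mem _ h'
    obtain ⟨q, hq⟩ := pv_find_some ((n0, c0) :: t) M hMl
    simp [hcnt, hq]

-- ===== VERDICT (by name: the statement is the Claim_ definition above) =====


theorem oscar_pool_spec : Claim_equal_oscar_pool := by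
  intro predictions _ hpre
  obtain ⟨hne, hlen⟩ := hpre
  obtain ⟨f0, rest, rfl⟩ : ∃ f0 rest, predictions = f0 :: rest := by
    cases predictions with
    | nil => exact absurd rfl hne
    | cons f0 rest => exact ⟨f0, rest, rfl⟩
  unfold Spec_oscar_pool oscar_pool oscar_pool_alt
  rw [pvFoldA_eq]
  have hmap : (f0 :: rest).map
      (fun f => ((PySem.List.pyGet? f 0).getD "", pvCorrectA (PySem.List.slice f (some 1) none)))
    = (f0 :: rest).map
      (fun f => ((PySem.List.pyGet? f 0).getD "", pvCorrectB f)) := by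
    apply List.map_congr_left
    intro f hf
    rw [pvCorrect_eq f (hlen f hf)]
  rw [hmap]
  exact pvMain (rest.map (fun f => ((PySem.List.pyGet? f 0).getD "", pvCorrectB f)))
    ((PySem.List.pyGet? f0 0).getD "") (pvCorrectB f0) (pvCorrectB_nonneg f0)
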